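-- pv_equiv track=rewrite | github.com/leo-guinan/voynich-exploration | src/ingestion/pdf_to_images.py | create_folio_mapping
-- ===== SOURCE A (Python) =====
-- def create_folio_mapping(num_pages: int) -> dict:
--     """
--     Generate a default folio mapping for standard folio numbering.
--
--     This assumes:
--     - Even pages (0, 2, 4...) are recto (r)
--     - Odd pages (1, 3, 5...) are verso (v)
--     - Folio numbers start at 1
--
--     WARNING: This is a template. The actual Voynich manuscript may have
--     different folio numbering or missing pages. Verify manually.
--     """
--     mapping = {}
--     folio_num = 1
--
--     for page_idx in range(num_pages):
--         if page_idx % 2 == 0: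
--             # Recto (right side)
--             mapping[page_idx] = f"f{folio_num:03d}r"
--         else:
--             # Verso (left side)
--             mapping[page_idx] = f"f{folio_num:03d}v"
--             folio_num += 1
--
--     return mapping
-- ===== SOURCE B (Python) =====
-- def create_folio_mapping(num_pages: int) -> dict:
--     """Iterate per physical folio SHEET, emitting its recto/verso page pair at
--     once; an odd positive page count leaves one unpaired final recto page."""
--     pairs = []
--     for folio in range(1, num_pages // 2 + 1):
--         pairs.append((2 * folio - 2, f"f{folio:03d}r"))
--         pairs.append((2 * folio - 1, f"f{folio:03d}v"))
--     if num_pages % 2 == 1 and num_pages > 0: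
--         pairs.append((num_pages - 1, f"f{num_pages // 2 + 1:03d}r"))
--     return dict(pairs)
-- ===== Notes on version B (the rewrite author's own statement) =====
-- stated objective: alternative
-- what changed: Instead of A's per-page loop threading a conditionally-incremented folio counter, B iterates per folio SHEET (num_pages//2 iterations), emitting the recto and verso entries of each sheet as a pair in one step and appending the lone unpaired recto when the page count is odd, then builds the dict from the pair list at the end.
import Mathlib
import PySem

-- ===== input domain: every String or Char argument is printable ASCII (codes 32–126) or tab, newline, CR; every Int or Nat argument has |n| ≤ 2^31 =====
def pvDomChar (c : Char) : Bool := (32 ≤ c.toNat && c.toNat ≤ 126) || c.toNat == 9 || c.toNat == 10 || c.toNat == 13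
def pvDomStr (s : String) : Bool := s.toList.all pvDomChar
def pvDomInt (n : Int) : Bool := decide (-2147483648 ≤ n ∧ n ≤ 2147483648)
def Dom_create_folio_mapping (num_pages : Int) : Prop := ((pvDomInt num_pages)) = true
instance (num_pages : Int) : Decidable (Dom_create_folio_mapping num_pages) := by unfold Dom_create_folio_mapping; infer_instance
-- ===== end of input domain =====

-- B iterates per folio SHEET (half as many iterations), emitting the recto/verso page
-- pair of each sheet at once instead of A's per-page loop with a threaded, conditionally
-- incremented folio counter (objective: alternative).

-- ===== PORT A =====
-- hand port of f"{n:03d}" (exact for n ≥ 0, the only values it is applied to here)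
def pvPad3 (n : Int) : String :=
  let s := PySem.Int.toChars n
  String.ofList (List.replicate (3 - s.length) '0' ++ s)

def create_folio_mapping (num_pages : Int) : List (Int × String) :=
  (((PySem.List.pyRange 0 num_pages 1).foldl
    (fun (st : PySem.Dict Int String × Int) page_idx =>
      if PySem.Int.mod page_idx 2 == 0 then
        (st.1.insert page_idx ("f" ++ pvPad3 st.2 ++ "r"), st.2)
      else
        (st.1.insert page_idx ("f" ++ pvPad3 st.2 ++ "v"), st.2 + 1))
    (PySem.Dict.empty, 1)).1).items

-- ===== PORT B =====
def create_folio_mapping_alt (num_pages : Int) : List (Int × String) :=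
  let pairs :=
    (PySem.List.pyRange 1 (PySem.Int.floordiv num_pages 2 + 1) 1).flatMap
      (fun folio =>
        [(2 * folio - 2, "f" ++ pvPad3 folio ++ "r"),
         (2 * folio - 1, "f" ++ pvPad3 folio ++ "v")])
  let pairs :=
    if PySem.Int.mod num_pages 2 == 1 && decide (num_pages > 0) then
      pairs ++ [(num_pages - 1, "f" ++ pvPad3 (PySem.Int.floordiv num_pages 2 + 1) ++ "r")]
    else pairs
  (PySem.Dict.ofList pairs).items

-- ===== PRECONDITION & SPEC =====
def Spec_create_folio_mapping (num_pages : Int) (out : List (Int × String)) : Prop := out = create_folio_mapping_alt num_pages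
instance (num_pages : Int) (out : List (Int × String)) : Decidable (Spec_create_folio_mapping num_pages out) := by unfold Spec_create_folio_mapping; infer_instance

-- ===== CLAIM (what is proved, stated in full; the proofs are below) =====
def Claim_equal_create_folio_mapping : Prop := ∀ (num_pages : Int), Dom_create_folio_mapping num_pages → Spec_create_folio_mapping num_pages (create_folio_mapping num_pages)

-- ===== LEMMAS AND PROOFS =====

-- the per-page label: common normal form of both sides
def pvLab (p : Int) : Int × String :=
  (p, "f" ++ pvPad3 (PySem.Int.floordiv p 2 + 1) ++
      (if PySem.Int.mod p 2 == 0 then "r" else "v"))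

-- A's loop invariant: after the first m pages A's dict holds exactly the labels
-- pvLab and A's folio counter equals m / 2 + 1
theorem pv_inv (m : Nat) :
    (PySem.List.pyRange 0 (m : Int) 1).foldl
      (fun (st : PySem.Dict Int String × Int) page_idx =>
        if PySem.Int.mod page_idx 2 == 0 then
          (st.1.insert page_idx ("f" ++ pvPad3 st.2 ++ "r"), st.2)
        else
          (st.1.insert page_idx ("f" ++ pvPad3 st.2 ++ "v"), st.2 + 1))
      (PySem.Dict.empty, 1)
    = (PySem.Dict.mk ((PySem.List.pyRange 0 (m : Int) 1).map pvLab), ((m / 2 : Nat) : Int) + 1) := by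
  induction m with
  | zero => simp [PySem.List.pyRange_one_eq_nil, PySem.Dict.empty]
  | succ m ih =>
    have h0 : (0 : Int) ≤ (m : Int) := by positivity
    have hsplit : PySem.List.pyRange 0 ((m : Int) + 1) 1
        = PySem.List.pyRange 0 (m : Int) 1 ++ [(m : Int)] :=
      PySem.List.pyRange_one_succ_right h0
    have hfresh : (PySem.Dict.mk ((PySem.List.pyRange 0 (m : Int) 1).map pvLab)).contains (m : Int) = false := by
      simp only [PySem.Dict.contains_mk]
      rw [List.any_eq_false]
      intro p hp
      simp only [List.mem_map] at hp
      obtain ⟨q, hq, rfl⟩ := hp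
      have := (PySem.List.mem_pyRange_one.mp hq).2
      simp only [pvLab, beq_iff_eq]
      omega
    push_cast
    rw [hsplit, List.foldl_append, ih]
    simp only [List.foldl_cons, List.foldl_nil, List.map_append, List.map_cons, List.map_nil]
    have hmod : PySem.Int.mod (m : Int) 2 = ((m % 2 : Nat) : Int) := by
      exact_mod_cast PySem.Int.mod_natCast m 2
    have hdiv : PySem.Int.floordiv (m : Int) 2 = ((m / 2 : Nat) : Int) := by
      exact_mod_cast PySem.Int.floordiv_natCast m 2
    rcases Nat.even_or_odd m with he | ho
    · have h2 : m % 2 = 0 := Nat.even_iff.mp he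
      have hd : (m + 1) / 2 = m / 2 := by omega
      simp only [hmod, h2, Nat.cast_zero, beq_self_eq_true, if_true]
      refine Prod.ext ?_ ?_
      · apply PySem.Dict.ext
        rw [PySem.Dict.items_insert_of_not_contains _ _ hfresh]
        simp only [pvLab, hmod, hdiv, h2, Nat.cast_zero]
        norm_num
      · omega
    · have h2 : m % 2 = 1 := Nat.odd_iff.mp ho
      have hd : (m + 1) / 2 = m / 2 + 1 := by omega
      have hne : ((((m % 2 : Nat) : Int)) == 0) = false := by
        simp [h2]
      simp only [hmod, hne, Bool.false_eq_true, if_false]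
      refine Prod.ext ?_ ?_
      · apply PySem.Dict.ext
        rw [PySem.Dict.items_insert_of_not_contains _ _ hfresh]
        simp only [pvLab, hmod, hdiv, h2, Nat.cast_one]
        norm_num
      · omega

-- dict(pairs) with pairwise-distinct keys keeps the list as-is
theorem pv_items_ofList (ps : List (Int × String)) (h : (ps.map Prod.fst).Nodup) :
    (PySem.Dict.ofList ps).items = ps := by
  unfold PySem.Dict.ofList PySem.Dict.update
  rw [PySem.Dict.items_foldl_insert_fresh ps Prod.fst Prod.snd _ (by simp) h]
  simp [PySem.Dict.empty]

-- B's sheet loop unrolled: k folio sheets produce exactly the labels of pages 0..2k-1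
theorem pv_sheets (k : Nat) :
    (PySem.List.pyRange 1 ((k : Int) + 1) 1).flatMap
      (fun folio =>
        [(2 * folio - 2, "f" ++ pvPad3 folio ++ "r"),
         (2 * folio - 1, "f" ++ pvPad3 folio ++ "v")])
    = (PySem.List.pyRange 0 (2 * (k : Int)) 1).map pvLab := by
  induction k with
  | zero => simp [PySem.List.pyRange_one_eq_nil]
  | succ k ih =>
    have h1 : (1 : Int) ≤ (k : Int) + 1 := by omega
    have hsplit : PySem.List.pyRange 1 (((k : Int) + 1) + 1) 1
        = PySem.List.pyRange 1 ((k : Int) + 1) 1 ++ [(k : Int) + 1] :=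
      PySem.List.pyRange_one_succ_right h1
    have hr1 : PySem.List.pyRange 0 (2 * (k : Int) + 2) 1
        = PySem.List.pyRange 0 (2 * (k : Int)) 1 ++ [2 * (k : Int)] ++ [2 * (k : Int) + 1] := by
      rw [show (2 * (k : Int) + 2) = (2 * (k : Int) + 1) + 1 by ring,
          PySem.List.pyRange_one_succ_right (by positivity),
          show (2 * (k : Int) + 1) = (2 * (k : Int)) + 1 by ring,
          PySem.List.pyRange_one_succ_right (by positivity)]
    have hdivE : PySem.Int.floordiv (2 * (k : Int)) 2 = (k : Int) := by
      rw [PySem.Int.floordiv_eq_ediv_of_pos (by norm_num)]; omega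
    have hdivO : PySem.Int.floordiv (2 * (k : Int) + 1) 2 = (k : Int) := by
      rw [PySem.Int.floordiv_eq_ediv_of_pos (by norm_num)]; omega
    have hmodE : PySem.Int.mod (2 * (k : Int)) 2 = 0 := by
      rw [PySem.Int.mod_eq_emod_of_pos (by norm_num)]; omega
    have hmodO : PySem.Int.mod (2 * (k : Int) + 1) 2 = 1 := by
      rw [PySem.Int.mod_eq_emod_of_pos (by norm_num)]; omega
    push_cast
    rw [hsplit, List.flatMap_append, ih, show 2 * ((k : Int) + 1) = 2 * (k : Int) + 2 by ring,
        hr1]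
    simp only [List.map_append, List.flatMap_cons, List.flatMap_nil, List.append_nil,
      List.map_cons, List.map_nil, List.append_assoc]
    congr 1
    simp only [pvLab, hdivE, hdivO, hmodE, hmodO]
    norm_num
    omega

-- ===== VERDICT (by name: the statement is the Claim_ definition above) =====
-- keys of the label list are the pages themselves
theorem pv_keys (r : List Int) : ((r.map pvLab).map Prod.fst) = r := by
  induction r with
  | nil => rfl
  | cons x xs ih => simp [pvLab, ih]

theorem create_folio_mapping_spec : Claim_equal_create_folio_mapping := by
  intro n _
  unfold Spec_create_folio_mapping create_folio_mapping create_folio_mapping_alt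
  have hdiv2 : PySem.Int.floordiv n 2 = n / 2 :=
    PySem.Int.floordiv_eq_ediv_of_pos (by norm_num)
  have hmod2 : PySem.Int.mod n 2 = n % 2 :=
    PySem.Int.mod_eq_emod_of_pos (by norm_num)
  by_cases hneg : n ≤ 0
  · rw [PySem.List.pyRange_one_eq_nil hneg]
    have hg : (PySem.Int.mod n 2 == 1 && decide (n > 0)) = false := by
      simp; omega
    rw [hg]
    simp only [Bool.false_eq_true, if_false]
    rw [PySem.List.pyRange_one_eq_nil (by rw [hdiv2]; omega)]
    simp [PySem.Dict.empty, PySem.Dict.ofList, PySem.Dict.update]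
  · have hn : n = ((n.toNat : Nat) : Int) := by omega
    obtain ⟨m, hm⟩ : ∃ m : Nat, n = (m : Int) := ⟨n.toNat, hn⟩
    subst hm
    rw [pv_inv m]
    have hfd : PySem.Int.floordiv (m : Int) 2 + 1 = ((m / 2 : Nat) : Int) + 1 := by
      rw [hdiv2]; omega
    rw [hfd, pv_sheets (m / 2)]
    rcases Nat.even_or_odd m with he | ho
    · -- even: no unpaired page, 2 * (m / 2) = m
      have h2 : m % 2 = 0 := Nat.even_iff.mp he
      have hg : (PySem.Int.mod (m : Int) 2 == 1 && decide ((m : Int) > 0)) = false := by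
        rw [hmod2]; simp; omega
      simp only [hg, Bool.false_eq_true, if_false]
      rw [show (2 * ((m / 2 : Nat) : Int)) = (m : Int) by omega]
      rw [pv_items_ofList _ (by rw [pv_keys]; exact PySem.List.nodup_pyRange_one 0 _)]
    · -- odd: one unpaired final recto page
      have h2 : m % 2 = 1 := Nat.odd_iff.mp ho
      have hg : (PySem.Int.mod (m : Int) 2 == 1 && decide ((m : Int) > 0)) = true := by
        rw [hmod2]; simp; omega
      simp only [hg, if_true]
      have hlast : PySem.List.pyRange 0 (m : Int) 1
          = PySem.List.pyRange 0 (2 * ((m / 2 : Nat) : Int)) 1 ++ [2 * ((m / 2 : Nat) : Int)] := by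
        rw [show (m : Int) = (2 * ((m / 2 : Nat) : Int)) + 1 by omega]
        exact PySem.List.pyRange_one_succ_right (by positivity)
      rw [pv_items_ofList _ ?keys]
      case keys =>
        simp only [List.map_append, List.map_cons, List.map_nil]
        rw [show ((m : Int) - 1) = 2 * ((m / 2 : Nat) : Int) by omega, pv_keys, ← hlast]
        exact PySem.List.nodup_pyRange_one 0 _
      rw [hlast, List.map_append]
      congr 1
      simp only [List.map_cons, List.map_nil, pvLab]
      have hdE : PySem.Int.floordiv (2 * ((m / 2 : Nat) : Int)) 2 = ((m / 2 : Nat) : Int) := by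
        rw [PySem.Int.floordiv_eq_ediv_of_pos (by norm_num)]; omega
      have hmE : PySem.Int.mod (2 * ((m / 2 : Nat) : Int)) 2 = 0 := by
        rw [PySem.Int.mod_eq_emod_of_pos (by norm_num)]; omega
      rw [hdE, hmE]
      norm_num
      omega
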